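-- pv_equiv track=rewrite | github.com/Aadarshbhushan-Singh/Python-Programs | Normal_Programs/pan_number_india.py | isPanNumber
-- ===== SOURCE A (Python) =====
-- def isPanNumber(number):
-- 	if len(number)!=10:
-- 		return False #Length is less or greater
-- 	for i in range(0,5):
-- 		if number[i].isalpha() is False:
-- 			return False
-- 	for i in range(5,9):
-- 		if number[i].isdigit() is False:
-- 			return False
-- 	if number[9].isalpha() is False:
-- 		return False
-- 	return True
-- ===== SOURCE B (Python) =====
-- PAN_PATTERN = 'AAAAADDDDA'
--
-- def isPanNumber(number):
--     def kind(c):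
--         return 'A' if c.isalpha() else 'D' if c.isdigit() else '?'
--     return ''.join(map(kind, number)) == PAN_PATTERN
-- ===== Notes on version B (the rewrite author's own statement) =====
-- stated objective: alternative
-- what changed: Instead of a length guard plus three per-range index loops of early returns, B classifies every character into a kind letter (alpha/digit/other) in one map pass and compares the resulting signature string against a fixed ten-character template; correctness uses that isalpha and isdigit are mutually exclusive.
import Mathlib
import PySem

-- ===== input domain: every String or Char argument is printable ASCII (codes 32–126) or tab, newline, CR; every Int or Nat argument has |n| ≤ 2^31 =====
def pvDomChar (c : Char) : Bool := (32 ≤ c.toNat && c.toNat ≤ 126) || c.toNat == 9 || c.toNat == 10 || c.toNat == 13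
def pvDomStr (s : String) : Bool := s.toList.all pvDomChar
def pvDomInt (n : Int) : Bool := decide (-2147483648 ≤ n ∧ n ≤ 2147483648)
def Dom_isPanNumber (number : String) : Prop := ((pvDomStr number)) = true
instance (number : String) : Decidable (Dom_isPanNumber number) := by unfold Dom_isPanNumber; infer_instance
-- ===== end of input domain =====

-- B replaces A's length guard plus three per-range index loops by one map pass that
-- classifies each character into a kind letter and compares the signature with a
-- fixed template (alternative decomposition; same cost).

-- ===== PORT A =====
-- per-character test at index i; the 'none' branch (Python's IndexError) is unreachable
-- after the length guard, since every index used is 0..9 < 10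
def pvCheckAt (cs : List Char) (p : Char → Bool) (i : Int) : Bool :=
  match PySem.List.pyGet? cs i with
  | some c => p c
  | none => false

def isPanNumber (number : String) : Bool :=
  if PySem.Str.len number ≠ 10 then false
  else if ¬ ((PySem.List.pyRange 0 5 1).all (pvCheckAt number.toList PySem.Chars.isalpha)) then false
  else if ¬ ((PySem.List.pyRange 5 9 1).all (pvCheckAt number.toList PySem.Chars.isdigit)) then false
  else if ¬ (pvCheckAt number.toList PySem.Chars.isalpha 9) then false
  else true

-- ===== PORT B =====
-- kind(c) from Source B
def pvKind (c : Char) : Char :=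
  if PySem.Chars.isalpha c then 'A' else if PySem.Chars.isdigit c then 'D' else '?'

-- ''.join(map(kind, number)) == PAN_PATTERN, string equality ported as List Char equality
def isPanNumber_alt (number : String) : Bool :=
  decide (number.toList.map pvKind = "AAAAADDDDA".toList)

-- ===== PRECONDITION & SPEC =====
def Spec_isPanNumber (number : String) (out : Bool) : Prop := out = isPanNumber_alt number
instance (number : String) (out : Bool) : Decidable (Spec_isPanNumber number out) := by unfold Spec_isPanNumber; infer_instance

-- ===== CLAIM (what is proved, stated in full; the proofs are below) =====
def Claim_equal_isPanNumber : Prop := ∀ (number : String), Dom_isPanNumber number → Spec_isPanNumber number (isPanNumber number)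

-- ===== LEMMAS AND PROOFS =====
theorem alpha_digit_excl (c : Char) : ¬(PySem.Chars.isalpha c ∧ PySem.Chars.isdigit c) := by
  simp only [PySem.Chars.isalpha, PySem.Chars.isupper, PySem.Chars.islower, PySem.Chars.isdigit,
    Bool.or_eq_true, Bool.and_eq_true, decide_eq_true_eq, Char.le_def, UInt32.le_iff_toNat_le]
  rintro ⟨h1, h2⟩
  rcases h1 with ⟨a, b⟩ | ⟨a, b⟩ <;> simp_all <;> omega

theorem pvKind_eq_A (c : Char) : (pvKind c = 'A') ↔ PySem.Chars.isalpha c = true := by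
  unfold pvKind
  split_ifs with h1 h2 <;> simp_all

theorem pvKind_eq_D (c : Char) : (pvKind c = 'D') ↔ PySem.Chars.isdigit c = true := by
  by_cases h1 : PySem.Chars.isalpha c
  · have hd : PySem.Chars.isdigit c = false := by
      cases hdd : PySem.Chars.isdigit c
      · rfl
      · exact absurd ⟨h1, hdd⟩ (alpha_digit_excl c)
    simp [pvKind, h1, hd]
  · by_cases h2 : PySem.Chars.isdigit c <;> simp [pvKind, h1, h2]

theorem pvCheckAt_0 (c0 c1 c2 c3 c4 c5 c6 c7 c8 c9 : Char) (p : Char → Bool) :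
    pvCheckAt [c0,c1,c2,c3,c4,c5,c6,c7,c8,c9] p (0 : Int) = p c0 := by
  simp [pvCheckAt, PySem.List.pyGet?, PySem.List.pyIdx?]

theorem pvCheckAt_1 (c0 c1 c2 c3 c4 c5 c6 c7 c8 c9 : Char) (p : Char → Bool) :
    pvCheckAt [c0,c1,c2,c3,c4,c5,c6,c7,c8,c9] p (1 : Int) = p c1 := by
  simp [pvCheckAt, PySem.List.pyGet?, PySem.List.pyIdx?]

theorem pvCheckAt_2 (c0 c1 c2 c3 c4 c5 c6 c7 c8 c9 : Char) (p : Char → Bool) :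
    pvCheckAt [c0,c1,c2,c3,c4,c5,c6,c7,c8,c9] p (2 : Int) = p c2 := by
  simp [pvCheckAt, PySem.List.pyGet?, PySem.List.pyIdx?]

theorem pvCheckAt_3 (c0 c1 c2 c3 c4 c5 c6 c7 c8 c9 : Char) (p : Char → Bool) :
    pvCheckAt [c0,c1,c2,c3,c4,c5,c6,c7,c8,c9] p (3 : Int) = p c3 := by
  simp [pvCheckAt, PySem.List.pyGet?, PySem.List.pyIdx?]

theorem pvCheckAt_4 (c0 c1 c2 c3 c4 c5 c6 c7 c8 c9 : Char) (p : Char → Bool) :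
    pvCheckAt [c0,c1,c2,c3,c4,c5,c6,c7,c8,c9] p (4 : Int) = p c4 := by
  simp [pvCheckAt, PySem.List.pyGet?, PySem.List.pyIdx?]

theorem pvCheckAt_5 (c0 c1 c2 c3 c4 c5 c6 c7 c8 c9 : Char) (p : Char → Bool) :
    pvCheckAt [c0,c1,c2,c3,c4,c5,c6,c7,c8,c9] p (5 : Int) = p c5 := by
  simp [pvCheckAt, PySem.List.pyGet?, PySem.List.pyIdx?]

theorem pvCheckAt_6 (c0 c1 c2 c3 c4 c5 c6 c7 c8 c9 : Char) (p : Char → Bool) :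
    pvCheckAt [c0,c1,c2,c3,c4,c5,c6,c7,c8,c9] p (6 : Int) = p c6 := by
  simp [pvCheckAt, PySem.List.pyGet?, PySem.List.pyIdx?]

theorem pvCheckAt_7 (c0 c1 c2 c3 c4 c5 c6 c7 c8 c9 : Char) (p : Char → Bool) :
    pvCheckAt [c0,c1,c2,c3,c4,c5,c6,c7,c8,c9] p (7 : Int) = p c7 := by
  simp [pvCheckAt, PySem.List.pyGet?, PySem.List.pyIdx?]

theorem pvCheckAt_8 (c0 c1 c2 c3 c4 c5 c6 c7 c8 c9 : Char) (p : Char → Bool) :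
    pvCheckAt [c0,c1,c2,c3,c4,c5,c6,c7,c8,c9] p (8 : Int) = p c8 := by
  simp [pvCheckAt, PySem.List.pyGet?, PySem.List.pyIdx?]

theorem pvCheckAt_9 (c0 c1 c2 c3 c4 c5 c6 c7 c8 c9 : Char) (p : Char → Bool) :
    pvCheckAt [c0,c1,c2,c3,c4,c5,c6,c7,c8,c9] p (9 : Int) = p c9 := by
  simp [pvCheckAt, PySem.List.pyGet?, PySem.List.pyIdx?]

set_option maxHeartbeats 4000000 in
theorem pan_eq_ten (n : String) (c0 c1 c2 c3 c4 c5 c6 c7 c8 c9 : Char)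
    (h10 : n.toList = [c0,c1,c2,c3,c4,c5,c6,c7,c8,c9]) : isPanNumber n = isPanNumber_alt n := by
  have r1 : PySem.List.pyRange 0 5 1 = [0,1,2,3,4] := by decide
  have r2 : PySem.List.pyRange 5 9 1 = [5,6,7,8] := by decide
  unfold isPanNumber isPanNumber_alt
  rw [r1, r2, h10]
  simp only [List.all_cons, List.all_nil,
    pvCheckAt_0, pvCheckAt_1, pvCheckAt_2, pvCheckAt_3, pvCheckAt_4,
    pvCheckAt_5, pvCheckAt_6, pvCheckAt_7, pvCheckAt_8, pvCheckAt_9]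
  have hlen : PySem.Str.len n = 10 := by simp [PySem.Str.len, h10]
  simp only [hlen]
  simp [List.map, pvKind_eq_A, pvKind_eq_D]
  ac_rfl

theorem pan_eq (n : String) : isPanNumber n = isPanNumber_alt n := by
  rcases h10 : n.toList with _|⟨c0,_|⟨c1,_|⟨c2,_|⟨c3,_|⟨c4,_|⟨c5,_|⟨c6,_|⟨c7,_|⟨c8,_|⟨c9,_|⟨c10,rest⟩⟩⟩⟩⟩⟩⟩⟩⟩⟩⟩
  case cons.cons.cons.cons.cons.cons.cons.cons.cons.cons.nil =>
    exact pan_eq_ten n c0 c1 c2 c3 c4 c5 c6 c7 c8 c9 h10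
  all_goals
    have hne : PySem.Str.len n ≠ 10 := by simp [h10]; try omega
    have hmap : (n.toList.map pvKind).length ≠ 10 := by
      simp only [List.length_map]
      intro h; apply hne; simp [PySem.Str.len, h]
    unfold isPanNumber isPanNumber_alt
    rw [if_pos hne]
    have hneq : n.toList.map pvKind ≠ "AAAAADDDDA".toList := by
      intro h; exact hmap (by rw [h]; decide)
    rw [decide_eq_false hneq]

-- ===== VERDICT (by name: the statement is the Claim_ definition above) =====
theorem isPanNumber_spec : Claim_equal_isPanNumber := by
  intro number _
  exact pan_eq number
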